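-- pv_equiv track=rewrite | github.com/skshruti/course_projects | information retrieval/COL764Project/loglogistic.py | tfIdf_preProcess
-- ===== SOURCE A (Python) =====
-- def tfIdf_preProcess(corpuslist):
--     inverse_doc_freq = {}   #vocabulary : doc frequency
--     term_freq = {}   #doc : term_frequency map
--     doc_length = {}
--     num_docs = 0
--     for doc in corpuslist:
--         num_docs += 1
--         doc_length[num_docs] = len(doc)
--         docTerm_freq = {}
--         for word in doc:
--             if(word == " " or word == "" ):
--                 continue
--             else:
--                 #word = p.stem(word.lower(), 0,len(word)-1)
--                 if(docTerm_freq.get(word) == None):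
--                     docTerm_freq[word] = 1
--                     if(inverse_doc_freq.get(word) == None):
--                         inverse_doc_freq[word] = 1
--                     else:
--                         inverse_doc_freq[word] += 1
--                 else:
--                     docTerm_freq[word] += 1
--         term_freq[num_docs] = docTerm_freq
--     return inverse_doc_freq, term_freq, num_docs, doc_length
-- ===== SOURCE B (Python) =====
-- def tfIdf_preProcess(corpuslist):
--     # Phase 1: one pass over the corpus building per-doc frequency maps and lengths.
--     term_freq = {}
--     doc_length = {}
--     num_docs = 0
--     for doc in corpuslist:
--         num_docs += 1
--         doc_length[num_docs] = len(doc)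
--         d = {}
--         for word in doc:
--             if word != " " and word != "":
--                 d[word] = d.get(word, 0) + 1
--         term_freq[num_docs] = d
--     # Phase 2: derive document frequencies from the per-doc maps.
--     inverse_doc_freq = {}
--     for d in term_freq.values():
--         for word in d:
--             inverse_doc_freq[word] = inverse_doc_freq.get(word, 0) + 1
--     return inverse_doc_freq, term_freq, num_docs, doc_length
-- ===== Notes on version B (the rewrite author's own statement) =====
-- stated objective: alternative
-- what changed: Splits A's single interleaved pass (which updates the global doc-frequency map inside the per-word branch of the inner loop) into two separate full passes: phase 1 builds only per-doc frequency maps and lengths with a plain get-default counter, phase 2 derives inverse_doc_freq by iterating the accumulated per-doc maps' keys.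
import Mathlib
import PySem

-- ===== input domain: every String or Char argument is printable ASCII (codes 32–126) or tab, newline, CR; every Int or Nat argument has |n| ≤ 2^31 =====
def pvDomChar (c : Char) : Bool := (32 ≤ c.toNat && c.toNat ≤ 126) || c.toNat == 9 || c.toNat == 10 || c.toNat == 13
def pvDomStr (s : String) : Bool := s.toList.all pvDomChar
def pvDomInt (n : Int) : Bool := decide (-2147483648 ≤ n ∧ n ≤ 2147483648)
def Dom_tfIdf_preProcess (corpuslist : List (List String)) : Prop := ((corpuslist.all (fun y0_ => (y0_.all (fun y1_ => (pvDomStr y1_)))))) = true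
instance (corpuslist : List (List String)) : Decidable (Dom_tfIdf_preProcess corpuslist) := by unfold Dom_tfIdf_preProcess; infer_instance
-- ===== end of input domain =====

-- B replaces A's single interleaved pass by two separate passes (per-doc counting, then
-- document-frequency derivation from the per-doc maps); same cost, different decomposition.


-- ===== PORT A =====
-- A's idf update: if inverse_doc_freq.get(word) is None set 1 else += 1
def tfIdfA_idfIncr (idf : PySem.Dict String Int) (w : String) : PySem.Dict String Int :=
  match idf.get? w with
  | none => idf.insert w 1
  | some v => idf.insert w (v + 1)

-- A's inner loop over a document's words, threading (inverse_doc_freq, docTerm_freq)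
def tfIdfA_inner (idf dtf : PySem.Dict String Int) :
    List String → PySem.Dict String Int × PySem.Dict String Int
  | [] => (idf, dtf)
  | w :: ws =>
    if w == " " || w == "" then tfIdfA_inner idf dtf ws
    else
      match dtf.get? w with
      | none => tfIdfA_inner (tfIdfA_idfIncr idf w) (dtf.insert w 1) ws
      | some v => tfIdfA_inner idf (dtf.insert w (v + 1)) ws

-- A's outer loop over the corpus
def tfIdfA_outer (idf : PySem.Dict String Int) (tf : PySem.Dict Int (PySem.Dict String Int))
    (n : Int) (dl : PySem.Dict Int Int) :
    List (List String) →
      PySem.Dict String Int × PySem.Dict Int (PySem.Dict String Int) × Int × PySem.Dict Int Int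
  | [] => (idf, tf, n, dl)
  | doc :: docs =>
    let n' := n + 1
    let dl' := dl.insert n' (doc.length : Int)
    let p := tfIdfA_inner idf PySem.Dict.empty doc
    tfIdfA_outer p.1 (tf.insert n' p.2) n' dl' docs

def tfIdf_preProcess (corpuslist : List (List String)) :
    (List (String × Int)) × (List (Int × List (String × Int))) × Int × (List (Int × Int)) :=
  let r := tfIdfA_outer PySem.Dict.empty PySem.Dict.empty 0 PySem.Dict.empty corpuslist
  (r.1.items, r.2.1.items.map (fun p => (p.1, p.2.items)), r.2.2.1, r.2.2.2.items)

-- ===== PORT B =====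
-- B's per-doc counter: d[word] = d.get(word, 0) + 1, skipping " " and ""
def tfIdfB_docMap (d : PySem.Dict String Int) (doc : List String) : PySem.Dict String Int :=
  doc.foldl (fun d w => if w != " " && w != "" then d.insert w (d.getD w 0 + 1) else d) d

-- B's phase 1: per-doc maps and lengths
def tfIdfB_phase1 (tf : PySem.Dict Int (PySem.Dict String Int)) (n : Int) (dl : PySem.Dict Int Int) :
    List (List String) → PySem.Dict Int (PySem.Dict String Int) × Int × PySem.Dict Int Int
  | [] => (tf, n, dl)
  | doc :: docs =>
    let n' := n + 1
    let dl' := dl.insert n' (doc.length : Int)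
    let d := tfIdfB_docMap PySem.Dict.empty doc
    tfIdfB_phase1 (tf.insert n' d) n' dl' docs

-- B's phase 2: document frequencies from the per-doc maps
def tfIdfB_phase2 (idf : PySem.Dict String Int) (ds : List (PySem.Dict String Int)) :
    PySem.Dict String Int :=
  ds.foldl (fun i d => d.keys.foldl (fun i w => i.insert w (i.getD w 0 + 1)) i) idf

def tfIdf_preProcess_alt (corpuslist : List (List String)) :
    (List (String × Int)) × (List (Int × List (String × Int))) × Int × (List (Int × Int)) :=
  let r := tfIdfB_phase1 PySem.Dict.empty 0 PySem.Dict.empty corpuslist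
  let idf := tfIdfB_phase2 PySem.Dict.empty r.1.values
  (idf.items, r.1.items.map (fun p => (p.1, p.2.items)), r.2.1, r.2.2.items)

-- ===== PRECONDITION & SPEC =====
def Spec_tfIdf_preProcess (corpuslist : List (List String)) (out : (List (String × Int)) × (List (Int × List (String × Int))) × Int × (List (Int × Int))) : Prop := out = tfIdf_preProcess_alt corpuslist
instance (corpuslist : List (List String)) (out : (List (String × Int)) × (List (Int × List (String × Int))) × Int × (List (Int × Int))) : Decidable (Spec_tfIdf_preProcess corpuslist out) := by unfold Spec_tfIdf_preProcess; infer_instance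

-- ===== CLAIM (what is proved, stated in full; the proofs are below) =====
def Claim_equal_tfIdf_preProcess : Prop := ∀ (corpuslist : List (List String)), Dom_tfIdf_preProcess corpuslist → Spec_tfIdf_preProcess corpuslist (tfIdf_preProcess corpuslist)

-- ===== LEMMAS AND PROOFS =====

theorem tfIdfB_docMap_cons_skip (d : PySem.Dict String Int) (w : String) (ws : List String)
    (hw : (w != " " && w != "") = false) :
    tfIdfB_docMap d (w :: ws) = tfIdfB_docMap d ws := by
  simp only [tfIdfB_docMap, List.foldl_cons, hw, Bool.false_eq_true, if_false]

theorem tfIdfB_docMap_cons_count (d : PySem.Dict String Int) (w : String) (ws : List String)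
    (hw : (w != " " && w != "") = true) :
    tfIdfB_docMap d (w :: ws) = tfIdfB_docMap (d.insert w (d.getD w 0 + 1)) ws := by
  simp only [tfIdfB_docMap, List.foldl_cons, hw]
  simp

-- A's conditional idf increment equals B's get-default increment
theorem tfIdfA_idfIncr_eq (idf : PySem.Dict String Int) (w : String) :
    tfIdfA_idfIncr idf w = idf.insert w (idf.getD w 0 + 1) := by
  unfold tfIdfA_idfIncr
  cases h : idf.get? w with
  | none => rw [PySem.Dict.getD_of_get?_eq_none idf 0 h]; simp
  | some v => rw [PySem.Dict.getD_of_get?_eq_some idf 0 h]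

-- the keys of B's per-doc counter extend the starting keys
theorem tfIdfB_docMap_keys (doc : List String) (d : PySem.Dict String Int) :
    ∃ t, (tfIdfB_docMap d doc).keys = d.keys ++ t := by
  induction doc generalizing d with
  | nil => exact ⟨[], by simp [tfIdfB_docMap]⟩
  | cons w ws ih =>
    cases hw : (w != " " && w != "") with
    | false =>
      rcases ih d with ⟨t, ht⟩
      exact ⟨t, by rw [tfIdfB_docMap_cons_skip d w ws hw, ht]⟩
    | true =>
      rcases ih (d.insert w (d.getD w 0 + 1)) with ⟨t, ht⟩
      rw [tfIdfB_docMap_cons_count d w ws hw]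
      cases hc : d.contains w with
      | true =>
        refine ⟨t, ?_⟩
        rw [ht, PySem.Dict.keys_insert_of_contains d _ hc]
      | false =>
        refine ⟨w :: t, ?_⟩
        rw [ht, PySem.Dict.keys_insert_of_not_contains d _ hc]
        simp

-- A's inner loop computes B's per-doc counter, folding the idf increment over its new keys
theorem tfIdfA_inner_eq (doc : List String) (idf dtf : PySem.Dict String Int) :
    tfIdfA_inner idf dtf doc =
      (((tfIdfB_docMap dtf doc).keys.drop dtf.keys.length).foldl
          (fun i w => i.insert w (i.getD w 0 + 1)) idf,
        tfIdfB_docMap dtf doc) := by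
  induction doc generalizing idf dtf with
  | nil => simp [tfIdfA_inner, tfIdfB_docMap, List.drop_length]
  | cons w ws ih =>
    cases hs : (w == " " || w == "") with
    | true =>
      have hw : (w != " " && w != "") = false := by
        cases h1 : w == " " <;> cases h2 : w == "" <;> simp_all [bne]
      rw [tfIdfB_docMap_cons_skip dtf w ws hw]
      simp only [tfIdfA_inner, hs, if_true]
      exact ih idf dtf
    | false =>
      have hw : (w != " " && w != "") = true := by
        cases h1 : w == " " <;> cases h2 : w == "" <;> simp_all [bne]
      rw [tfIdfB_docMap_cons_count dtf w ws hw]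
      cases h : dtf.get? w with
      | none =>
        have hc : dtf.contains w = false := (PySem.Dict.get?_eq_none_iff_contains dtf w).mp h
        have hd0 : dtf.getD w 0 = 0 := PySem.Dict.getD_of_get?_eq_none dtf 0 h
        have hkeys : (dtf.insert w (dtf.getD w 0 + 1)).keys = dtf.keys ++ [w] :=
          PySem.Dict.keys_insert_of_not_contains dtf _ hc
        have hins : dtf.insert w (dtf.getD w 0 + 1) = dtf.insert w 1 := by
          rw [hd0]; norm_num
        rcases tfIdfB_docMap_keys ws (dtf.insert w 1) with ⟨t, ht⟩
        have hkeys1 : (dtf.insert w 1).keys = dtf.keys ++ [w] := by rw [← hins, hkeys]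
        have hR : (tfIdfB_docMap (dtf.insert w 1) ws).keys
            = (dtf.keys ++ [w]) ++ t := by rw [ht, hkeys1]
        have hdrop1 : ((dtf.keys ++ [w]) ++ t).drop (dtf.keys ++ [w]).length = t :=
          List.drop_left
        have hdrop2 : ((dtf.keys ++ [w]) ++ t).drop dtf.keys.length = w :: t := by
          rw [List.append_assoc, List.drop_left]; rfl
        simp only [tfIdfA_inner, hs, Bool.false_eq_true, if_false, h]
        rw [hins, ih, tfIdfA_idfIncr_eq, hR, hkeys1, hdrop1, hdrop2]
        simp
      | some v =>
        have hc : dtf.contains w = true := by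
          cases hcc : dtf.contains w with
          | false =>
            rw [(PySem.Dict.get?_eq_none_iff_contains dtf w).mpr hcc] at h; cases h
          | true => rfl
        have hd0 : dtf.getD w 0 = v := PySem.Dict.getD_of_get?_eq_some dtf 0 h
        have hkeys : (dtf.insert w (dtf.getD w 0 + 1)).keys = dtf.keys :=
          PySem.Dict.keys_insert_of_contains dtf _ hc
        simp only [tfIdfA_inner, hs, Bool.false_eq_true, if_false, h]
        rw [show dtf.insert w (v + 1) = dtf.insert w (dtf.getD w 0 + 1) by rw [hd0]]
        rw [ih, hkeys]

-- A's outer loop splits into B's two phases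
theorem tfIdfA_outer_eq (docs : List (List String)) (idf : PySem.Dict String Int)
    (tf : PySem.Dict Int (PySem.Dict String Int)) (n : Int) (dl : PySem.Dict Int Int) :
    tfIdfA_outer idf tf n dl docs =
      (tfIdfB_phase2 idf (docs.map (tfIdfB_docMap PySem.Dict.empty)),
        tfIdfB_phase1 tf n dl docs) := by
  induction docs generalizing idf tf n dl with
  | nil => simp [tfIdfA_outer, tfIdfB_phase1, tfIdfB_phase2]
  | cons doc docs ih =>
    simp only [tfIdfA_outer, tfIdfB_phase1, List.map_cons]
    rw [tfIdfA_inner_eq, ih]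
    simp [tfIdfB_phase2, PySem.Dict.keys_empty]

-- phase 1 appends the per-doc maps to the values of tf when existing keys are ≤ n
theorem tfIdfB_phase1_values (docs : List (List String))
    (tf : PySem.Dict Int (PySem.Dict String Int)) (n : Int) (dl : PySem.Dict Int Int)
    (h : ∀ k ∈ tf.keys, k ≤ n) :
    (tfIdfB_phase1 tf n dl docs).1.values
      = tf.values ++ docs.map (tfIdfB_docMap PySem.Dict.empty) := by
  induction docs generalizing tf n dl with
  | nil => simp [tfIdfB_phase1]
  | cons doc docs ih =>
    simp only [tfIdfB_phase1, List.map_cons]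
    have hnm : (n + 1) ∉ tf.keys := fun hm => by have := h _ hm; omega
    have hc : tf.contains (n + 1) = false := by
      rw [PySem.Dict.contains_eq_decide_mem_keys]; simp [hnm]
    have h' : ∀ k ∈ (tf.insert (n + 1) (tfIdfB_docMap PySem.Dict.empty doc)).keys, k ≤ n + 1 := by
      intro k hk
      rw [PySem.Dict.keys_insert_of_not_contains tf _ hc] at hk
      rcases List.mem_append.mp hk with hk | hk
      · have := h _ hk; omega
      · simp at hk; omega
    rw [ih _ _ _ h']
    rw [show (tf.insert (n + 1) (tfIdfB_docMap PySem.Dict.empty doc)).values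
        = tf.values ++ [tfIdfB_docMap PySem.Dict.empty doc] by
      simp [PySem.Dict.values, PySem.Dict.items_insert_of_not_contains tf _ hc]]
    simp

-- ===== VERDICT (by name: the statement is the Claim_ definition above) =====
theorem tfIdf_preProcess_spec : Claim_equal_tfIdf_preProcess := by
  intro corpuslist _
  unfold Spec_tfIdf_preProcess
  simp only [tfIdf_preProcess, tfIdf_preProcess_alt]
  rw [tfIdfA_outer_eq,
      tfIdfB_phase1_values _ _ _ _ (by simp [PySem.Dict.keys_empty])]
  simp [PySem.Dict.values, PySem.Dict.empty]
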